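-- pv_equiv track=rewrite | github.com/BenjaminHae/wifi-manager | barcode.py | encodeInformation
-- ===== SOURCE A (Python) =====
-- def encodeInformation(ssid,encryption,psk, hidden=False):
--   info = "WIFI:T:{encryption};S:{ssid};P:{psk};{hidden};"
--   if encryption.lower().find("wpa") > -1:
--     encryption="WPA"
--   elif encryption.lower().find("wep") > -1:
--     encryption="WEP"
--   else:
--     encryption="nopass"
--   # encryption =(WPA, WEP, nopass)
--   hide = ""
--   if hidden == True:
--     hide = "H:true"
--   replacement = "\\'\".:,;" # \'".:,; zuerst den backslash!
--   for ch in replacement: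
--     ssid = ssid.replace(ch,"\\" + ch)
--     psk = psk.replace(ch,"\\" + ch)
--   return info.format(encryption = encryption, ssid = ssid, psk = psk, hidden = hide)
-- ===== SOURCE B (Python) =====
-- def encodeInformation(ssid, encryption, psk, hidden=False):
--     enc_l = encryption.lower()
--     if "wpa" in enc_l:
--         encryption = "WPA"
--     elif "wep" in enc_l:
--         encryption = "WEP"
--     else:
--         encryption = "nopass"
--     hide = "H:true" if hidden == True else ""
--     special = frozenset("\\'\".:,;")
--     def esc(s):
--         return ''.join('\\' + c if c in special else c for c in s)
--     return "WIFI:T:%s;S:%s;P:%s;%s;" % (encryption, esc(ssid), esc(psk), hide)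
-- ===== Notes on version B (the rewrite author's own statement) =====
-- stated objective: simpler
-- what changed: Replaces the seven sequential full-string str.replace passes over ssid and psk with one single-pass character scan per string that prepends a backslash to each character from a precomputed special set, and classifies encryption with 'in' instead of find() > -1.
import Mathlib
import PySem

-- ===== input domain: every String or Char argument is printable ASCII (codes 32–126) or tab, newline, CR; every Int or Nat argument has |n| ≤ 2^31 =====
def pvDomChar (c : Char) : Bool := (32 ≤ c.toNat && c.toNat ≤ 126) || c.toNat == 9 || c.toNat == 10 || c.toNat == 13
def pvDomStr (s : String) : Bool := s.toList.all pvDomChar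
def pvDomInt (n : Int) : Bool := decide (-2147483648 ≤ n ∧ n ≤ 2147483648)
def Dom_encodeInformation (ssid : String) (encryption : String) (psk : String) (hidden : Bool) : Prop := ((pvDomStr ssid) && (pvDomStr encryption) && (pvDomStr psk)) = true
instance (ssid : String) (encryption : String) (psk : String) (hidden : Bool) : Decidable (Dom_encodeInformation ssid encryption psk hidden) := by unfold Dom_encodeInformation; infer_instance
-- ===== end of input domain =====

-- B replaces A's seven sequential full-string replace passes by a single per-character scan
-- with a special-character set, and uses substring membership instead of find() > -1 (objective: simpler).

-- ===== PORT A =====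
def encodeInformation (ssid : String) (encryption : String) (psk : String) (hidden : Bool) : String :=
  let enc :=
    if PySem.Str.find (PySem.Str.lower encryption) "wpa" > -1 then "WPA"
    else if PySem.Str.find (PySem.Str.lower encryption) "wep" > -1 then "WEP"
    else "nopass"
  let hide := if hidden = true then "H:true" else ""
  -- the loop 'for ch in replacement: ssid = ssid.replace(...); psk = psk.replace(...)'
  let p := "\\'\".:,;".toList.foldl
    (fun (sp : String × String) ch =>
      (PySem.Str.replace sp.1 (String.ofList [ch]) (String.ofList ['\\', ch]),
       PySem.Str.replace sp.2 (String.ofList [ch]) (String.ofList ['\\', ch])))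
    (ssid, psk)
  -- info.format(...) as the corresponding concatenation
  "WIFI:T:" ++ enc ++ ";S:" ++ p.1 ++ ";P:" ++ p.2 ++ ";" ++ hide ++ ";"

-- ===== PORT B =====
-- ''.join('\\' + c if c in special else c for c in s), special = frozenset("\\'\".:,;")
def pvEscape (s : String) : String :=
  String.ofList (s.toList.flatMap
    (fun c => if c ∈ ['\\', '\'', '"', '.', ':', ',', ';'] then ['\\', c] else [c]))

def encodeInformation_alt (ssid : String) (encryption : String) (psk : String) (hidden : Bool) : String :=
  let encL := PySem.Str.lower encryption
  let enc :=
    if PySem.Str.isIn "wpa" encL then "WPA"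
    else if PySem.Str.isIn "wep" encL then "WEP"
    else "nopass"
  let hide := if hidden = true then "H:true" else ""
  "WIFI:T:" ++ enc ++ ";S:" ++ pvEscape ssid ++ ";P:" ++ pvEscape psk ++ ";" ++ hide ++ ";"

-- ===== PRECONDITION & SPEC =====
def Spec_encodeInformation (ssid : String) (encryption : String) (psk : String) (hidden : Bool) (out : String) : Prop := out = encodeInformation_alt ssid encryption psk hidden
instance (ssid : String) (encryption : String) (psk : String) (hidden : Bool) (out : String) : Decidable (Spec_encodeInformation ssid encryption psk hidden out) := by unfold Spec_encodeInformation; infer_instance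

-- ===== CLAIM (what is proved, stated in full; the proofs are below) =====
def Claim_equal_encodeInformation : Prop := ∀ (ssid : String) (encryption : String) (psk : String) (hidden : Bool), Dom_encodeInformation ssid encryption psk hidden → Spec_encodeInformation ssid encryption psk hidden (encodeInformation ssid encryption psk hidden)

-- ===== LEMMAS AND PROOFS =====

-- Characterisation of PySem replace with a single-character needle.
theorem pvGo_single (c0 : Char) (nw : List Char) :
    ∀ (l acc : List Char) (fuel : Nat), l.length ≤ fuel →
      PySem.Chars.replace.go [c0] nw fuel l acc
        = acc.reverse ++ l.flatMap (fun a => if a = c0 then nw else [a]) := by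
  intro l
  induction l with
  | nil =>
      intro acc fuel _
      cases fuel <;> simp [PySem.Chars.replace.go]
  | cons a t ih =>
      intro acc fuel hf
      cases fuel with
      | zero => simp at hf
      | succ n =>
          rw [PySem.Chars.replace.go]
          by_cases h : a = c0
          · subst h
            simp only [List.isPrefixOf, BEq.rfl, Bool.and_true, if_pos,
              List.length_cons, List.length_nil, List.drop_succ_cons, List.drop_zero]
            rw [ih (nw.reverse ++ acc) n (by simpa using hf)]
            simp
          · have hb : ([c0].isPrefixOf (a :: t)) = false := by
              simp [List.isPrefixOf]
              exact fun hc => absurd hc.symm h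
            rw [hb]
            simp only [Bool.false_eq_true, if_false]
            rw [ih (a :: acc) n (by simpa using hf)]
            simp [h]

theorem pvReplace_single (c0 : Char) (nw l : List Char) :
    PySem.Chars.replace l [c0] nw = l.flatMap (fun a => if a = c0 then nw else [a]) := by
  rw [PySem.Chars.replace]
  simp only [List.isEmpty_cons, Bool.false_eq_true, if_false]
  simpa using pvGo_single c0 nw l [] l.length le_rfl

-- One Python-level string replace step, on the list side.
def pvEsc1 (c0 : Char) (a : Char) : List Char := if a = c0 then ['\\', c0] else [a]

-- The seven sequential replaces equal B's single scan.
theorem pvFold_chars (L : List Char) (s : String) :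
    L.foldl (fun t ch => PySem.Str.replace t (String.ofList [ch]) (String.ofList ['\\', ch])) s
      = String.ofList (L.foldl (fun l ch => PySem.Chars.replace l [ch] ['\\', ch]) s.toList) := by
  induction L generalizing s with
  | nil => simp
  | cons c L ih =>
      simp only [List.foldl]
      rw [ih]
      congr 1
      congr 1
      simp [PySem.Str.replace]

theorem pvSeq_chars (l : List Char) :
    ['\\', '\'', '"', '.', ':', ',', ';'].foldl
        (fun l ch => PySem.Chars.replace l [ch] ['\\', ch]) l
      = l.flatMap (fun c => if c ∈ ['\\', '\'', '"', '.', ':', ',', ';'] then ['\\', c] else [c]) := by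
  simp only [List.foldl]
  simp only [pvReplace_single]
  simp only [show ∀ (c0 : Char), (fun a => if a = c0 then ['\\', c0] else [a]) = pvEsc1 c0 from
    fun _ => rfl]
  simp only [List.flatMap_assoc]
  apply List.flatMap_congr
  intro a _
  by_cases h1 : a = '\\'; · subst h1; decide
  by_cases h2 : a = '\''; · subst h2; decide
  by_cases h3 : a = '"';  · subst h3; decide
  by_cases h4 : a = '.';  · subst h4; decide
  by_cases h5 : a = ':';  · subst h5; decide
  by_cases h6 : a = ',';  · subst h6; decide
  by_cases h7 : a = ';';  · subst h7; decide
  simp [pvEsc1, h1, h2, h3, h4, h5, h6, h7]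

theorem pvSeq_str (s : String) :
    "\\'\".:,;".toList.foldl
      (fun t ch => PySem.Str.replace t (String.ofList [ch]) (String.ofList ['\\', ch])) s
      = pvEscape s := by
  have hlist : "\\'\".:,;".toList = ['\\', '\'', '"', '.', ':', ',', ';'] := by decide
  rw [hlist, pvFold_chars, pvSeq_chars]
  rfl

-- A's encryption classification (find > -1) agrees with B's (substring membership).
theorem pvEnc (e : String) :
    (if PySem.Str.find (PySem.Str.lower e) "wpa" > -1 then "WPA"
     else if PySem.Str.find (PySem.Str.lower e) "wep" > -1 then "WEP"
     else "nopass")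
    = (if PySem.Str.isIn "wpa" (PySem.Str.lower e) then "WPA"
       else if PySem.Str.isIn "wep" (PySem.Str.lower e) then "WEP"
       else "nopass") := by
  have hwpa : (PySem.Str.find (PySem.Str.lower e) "wpa" > -1)
      ↔ (PySem.Str.isIn "wpa" (PySem.Str.lower e) = true) := by
    rw [PySem.Str.isIn_iff_infix, ← PySem.Str.find_nonneg_iff]
    omega
  have hwep : (PySem.Str.find (PySem.Str.lower e) "wep" > -1)
      ↔ (PySem.Str.isIn "wep" (PySem.Str.lower e) = true) := by
    rw [PySem.Str.isIn_iff_infix, ← PySem.Str.find_nonneg_iff]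
    omega
  exact if_congr hwpa rfl (if_congr hwep rfl rfl)

theorem pvFoldl_pair {α β γ : Type} (f : α → γ → α) (g : β → γ → β) (L : List γ)
    (a : α) (b : β) :
    L.foldl (fun p c => (f p.1 c, g p.2 c)) (a, b) = (L.foldl f a, L.foldl g b) := by
  induction L generalizing a b with
  | nil => rfl
  | cons c L ih => simp [List.foldl, ih]

-- ===== VERDICT (by name: the statement is the Claim_ definition above) =====
theorem encodeInformation_spec : Claim_equal_encodeInformation := by
  intro ssid encryption psk hidden _
  unfold Spec_encodeInformation
  simp only [encodeInformation, encodeInformation_alt]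
  rw [pvFoldl_pair (fun t ch => PySem.Str.replace t (String.ofList [ch]) (String.ofList ['\\', ch]))
    (fun t ch => PySem.Str.replace t (String.ofList [ch]) (String.ofList ['\\', ch])) _ ssid psk]
  rw [pvSeq_str ssid, pvSeq_str psk, pvEnc]
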